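-- pv_equiv track=rewrite | github.com/karpov78/rosalind-algo | python/coursera/util.py | dClosure
-- ===== SOURCE A (Python) =====
-- def dClosure(s, d, fixed=None, res=None):
--     fixed = [] if not fixed else fixed
--     res = set() if not res else res
--
--     res.add(''.join(s))
--     if d == 0:
--         return
--
--     for i in range(len(s)):
--         if not i in fixed:
--             orig = s[i]
--             for ch in 'ACGT':
--                 if ch != orig:
--                     s[i] = ch
--                     dClosure(s, d - 1, fixed + [i], res)
--             s[i] = orig
--     return res
-- ===== SOURCE B (Python) =====
-- def dClosure(s, d, fixed=None, res=None):
--     banned = set(fixed) if fixed else set()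
--     out = res if res else set()
--     n = len(s)
--
--     stack = [(list(s), d, 0)]
--     while stack:
--         t, k, start = stack.pop()
--         out.add(''.join(t))
--         if k != 0:
--             children = [(t[:i] + [ch] + t[i + 1:], k - 1, i + 1)
--                         for i in range(start, n) if i not in banned
--                         for ch in 'ACGT' if ch != t[i]]
--             stack.extend(reversed(children))
--     return out
-- ===== Notes on version B (the rewrite author's own statement) =====
-- stated objective: alternative
-- what changed: B replaces A's in-place mutating recursion over all non-fixed positions (which re-generates each set of changed positions once per permutation and copies the fixed list at every call) by an iterative explicit-stack DFS over immutable frames (string, budget, start) that extends only positions >= start, so each combination of changed positions is produced once and there is no recursion and no growing fixed list.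
-- outside the precondition, e.g. on dClosure(['A'], 0, None, None): A returns None, B returns {'A'}
import Mathlib
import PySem

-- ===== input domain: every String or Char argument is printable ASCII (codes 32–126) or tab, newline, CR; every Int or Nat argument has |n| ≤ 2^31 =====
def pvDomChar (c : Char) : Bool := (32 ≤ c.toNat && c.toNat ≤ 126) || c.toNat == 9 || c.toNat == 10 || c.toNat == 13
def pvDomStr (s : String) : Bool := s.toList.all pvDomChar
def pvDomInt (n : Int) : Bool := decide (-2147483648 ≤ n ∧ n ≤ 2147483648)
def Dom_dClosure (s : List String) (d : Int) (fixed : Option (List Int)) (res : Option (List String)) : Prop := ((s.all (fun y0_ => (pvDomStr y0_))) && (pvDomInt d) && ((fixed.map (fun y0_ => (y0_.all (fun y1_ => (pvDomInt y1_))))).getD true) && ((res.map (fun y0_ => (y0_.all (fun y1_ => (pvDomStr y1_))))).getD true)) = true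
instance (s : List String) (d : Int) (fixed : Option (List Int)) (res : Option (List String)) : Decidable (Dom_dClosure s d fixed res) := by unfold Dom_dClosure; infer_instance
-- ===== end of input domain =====

-- B replaces A's mutating recursion by an iterative explicit-stack DFS over immutable frames;
-- both Pythons mutate the caller's res set in place; the equivalence proved is about the
-- returned set (its element list, identical for both ports).

def pvChs : List String := ["A", "C", "G", "T"]

def pvJoin (s : List String) : String := PySem.Str.join "" s

-- termination measure for port A: number of non-fixed indices below n
def pvFree (n : Nat) (F : List Int) : Nat :=
  ((List.range n).filter (fun j : Nat => !(F.contains (j : Int)))).length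

theorem pv_countP_lt {α : Type} (p q : α → Bool) (l : List α)
    (hpq : ∀ x ∈ l, p x = true → q x = true) (x : α) (hx : x ∈ l)
    (hqx : q x = true) (hpx : p x = false) : l.countP p < l.countP q := by
  induction l with
  | nil => cases hx
  | cons a t ih =>
    rw [List.countP_cons, List.countP_cons]
    rcases List.mem_cons.mp hx with rfl | hxt
    · have hle : t.countP p ≤ t.countP q :=
        List.countP_mono_left (fun y hy => hpq y (List.mem_cons_of_mem _ hy))
      simp [hqx, hpx]
      exact hle
    · have hlt := ih (fun y hy => hpq y (List.mem_cons_of_mem _ hy)) hxt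
      have hif : (if p a = true then 1 else 0) ≤ (if q a = true then 1 else 0) := by
        by_cases hpa : p a = true
        · simp [hpa, hpq a List.mem_cons_self hpa]
        · simp [hpa]
      omega

theorem pvFree_lt (n i : Nat) (F : List Int) (h : i < n)
    (hF : F.contains (i : Int) = false) :
    pvFree n (F ++ [(i : Int)]) < pvFree n F := by
  unfold pvFree
  rw [← List.countP_eq_length_filter, ← List.countP_eq_length_filter]
  refine pv_countP_lt (fun j : Nat => !((F ++ [(i : Int)]).contains (j : Int)))
    (fun j : Nat => !(F.contains (j : Int))) (List.range n) ?_ i (List.mem_range.mpr h) ?_ ?_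
  · intro x _ hp
    simp only [List.contains_eq_mem, List.mem_append, Bool.not_eq_true', decide_eq_false_iff_not] at hp ⊢
    exact fun hm => hp (Or.inl hm)
  · simp only [Bool.not_eq_true', decide_eq_false_iff_not]
    exact hF
  · simp [List.contains_eq_mem]

-- ===== PORT A =====
-- transliteration of A: res threads through the recursion (Python mutates res in place);
-- s[i] = ch ; recurse ; restore  becomes recursion on (s.set i ch) built from the original s.
mutual
def goA (s : List String) (d : Int) (F : List Int) (R : PySem.Set String) : PySem.Set String :=
  let R1 := PySem.Set.add R (pvJoin s)
  if d = 0 then R1 else loopA s d F 0 R1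
termination_by (pvFree s.length F, 2, 0)
decreasing_by all_goals (
  first
    | exact Prod.Lex.right _ (Prod.Lex.left _ _ (by omega))
    | exact Prod.Lex.right _ (Prod.Lex.right _ (by omega))
    | exact Prod.Lex.right _ (Prod.Lex.right _ (by simp only [List.length_cons]; omega))
    | exact Prod.Lex.right _ (Prod.Lex.right _ (Prod.Lex.left _ _ (by omega)))
    | exact Prod.Lex.right _ (Prod.Lex.right _ (Prod.Lex.right _ (by omega)))
    | exact Prod.Lex.right _ (Prod.Lex.right _ (Prod.Lex.right _ (by simp only [List.length_cons]; omega)))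
    | exact Prod.Lex.right _ (Prod.Lex.right _ (Prod.Lex.right _ (by simp only [pvChs, List.length_cons, List.length_nil]; omega)))
    | exact Prod.Lex.left _ _ (by omega)
    | exact Prod.Lex.left _ _ (by simp only [List.length_set]; omega)
    | (refine Prod.Lex.left _ _ ?_
       try simp only [List.length_set]
       refine pvFree_lt _ _ _ (by omega) (by rw [Bool.eq_false_iff]; assumption)))
def loopA (s : List String) (d : Int) (F : List Int) (i : Nat) (R : PySem.Set String) : PySem.Set String :=
  if h : i < s.length then
    loopA s d F (i + 1)
      (if hF : F.contains (i : Int) = true then R else chloopA s d F i h hF pvChs R)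
  else R
termination_by (pvFree s.length F, 1, s.length - i)
decreasing_by all_goals (
  first
    | exact Prod.Lex.right _ (Prod.Lex.left _ _ (by omega))
    | exact Prod.Lex.right _ (Prod.Lex.right _ (by omega))
    | exact Prod.Lex.right _ (Prod.Lex.right _ (by simp only [List.length_cons]; omega))
    | exact Prod.Lex.right _ (Prod.Lex.right _ (Prod.Lex.left _ _ (by omega)))
    | exact Prod.Lex.right _ (Prod.Lex.right _ (Prod.Lex.right _ (by omega)))
    | exact Prod.Lex.right _ (Prod.Lex.right _ (Prod.Lex.right _ (by simp only [List.length_cons]; omega)))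
    | exact Prod.Lex.right _ (Prod.Lex.right _ (Prod.Lex.right _ (by simp only [pvChs, List.length_cons, List.length_nil]; omega)))
    | exact Prod.Lex.left _ _ (by omega)
    | exact Prod.Lex.left _ _ (by simp only [List.length_set]; omega)
    | (refine Prod.Lex.left _ _ ?_
       try simp only [List.length_set]
       refine pvFree_lt _ _ _ (by omega) (by rw [Bool.eq_false_iff]; assumption)))
def chloopA (s : List String) (d : Int) (F : List Int) (i : Nat) (h : i < s.length)
    (hF : ¬ F.contains (i : Int) = true) (cs : List String) (R : PySem.Set String) : PySem.Set String :=
  match cs with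
  | [] => R
  | c :: rest =>
      chloopA s d F i h hF rest
        (if c ≠ s.getD i "" then goA (s.set i c) (d - 1) (F ++ [(i : Int)]) R else R)
termination_by (pvFree s.length F, 0, cs.length)
decreasing_by all_goals (
  first
    | exact Prod.Lex.right _ (Prod.Lex.left _ _ (by omega))
    | exact Prod.Lex.right _ (Prod.Lex.right _ (by omega))
    | exact Prod.Lex.right _ (Prod.Lex.right _ (by simp only [List.length_cons]; omega))
    | exact Prod.Lex.right _ (Prod.Lex.right _ (Prod.Lex.left _ _ (by omega)))
    | exact Prod.Lex.right _ (Prod.Lex.right _ (Prod.Lex.right _ (by omega)))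
    | exact Prod.Lex.right _ (Prod.Lex.right _ (Prod.Lex.right _ (by simp only [List.length_cons]; omega)))
    | exact Prod.Lex.right _ (Prod.Lex.right _ (Prod.Lex.right _ (by simp only [pvChs, List.length_cons, List.length_nil]; omega)))
    | exact Prod.Lex.left _ _ (by omega)
    | exact Prod.Lex.left _ _ (by simp only [List.length_set]; omega)
    | (refine Prod.Lex.left _ _ ?_
       try simp only [List.length_set]
       refine pvFree_lt _ _ _ (by omega) (by rw [Bool.eq_false_iff]; assumption)))
end

def dClosure (s : List String) (d : Int) (fixed : Option (List Int)) (res : Option (List String)) : List String :=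
  let F : List Int := match fixed with
    | none => []
    | some l => if l.isEmpty then [] else l
  let R : PySem.Set String := match res with
    | none => PySem.Set.empty
    | some l => if l.isEmpty then PySem.Set.empty else PySem.Set.ofList l
  goA s d F R

-- ===== PORT B =====
-- transliteration of B: an explicit stack of immutable frames (t, k, start); the Lean stack's
-- HEAD is the Python list's END (its top), so Python's `stack.extend(reversed(children))` then
-- `stack.pop()` is `children ++ rest`.  Frames always satisfy t.length = len(s) = n, so the
-- comprehension bound n is written t.length.

-- the children list comprehension:
-- [(t[:i]+[ch]+t[i+1:], k-1, i+1) for i in range(start, n) if i not in banned for ch in 'ACGT' if ch != t[i]]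
def pvKids (bnd : PySem.Set Int) (t : List String) (k : Int) (i : Nat) :
    List (List String × Int × Nat) :=
  if _h : i < t.length then
    (if PySem.Set.contains bnd (i : Int) then []
     else (pvChs.filter (fun c => c ≠ t.getD i "")).map (fun c => (t.set i c, k - 1, i + 1)))
    ++ pvKids bnd t k (i + 1)
  else []
termination_by t.length - i

-- potential of a frame / a stack, used only to justify termination of the while loop
def pvPot (f : List String × Int × Nat) : Nat := 5 ^ (f.1.length - f.2.2)

def pvStackPot (st : List (List String × Int × Nat)) : Nat := (st.map pvPot).sum

theorem pvStackPot_append (a b : List (List String × Int × Nat)) :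
    pvStackPot (a ++ b) = pvStackPot a + pvStackPot b := by
  simp [pvStackPot]

theorem pvMapPot (t : List String) (k : Int) (i : Nat) (cs : List String) :
    pvStackPot (cs.map (fun c => (t.set i c, k - 1, i + 1))) =
      cs.length * 5 ^ (t.length - (i + 1)) := by
  induction cs with
  | nil => simp [pvStackPot]
  | cons a l ih =>
    simp only [List.map_cons, pvStackPot, List.sum_cons, List.length_cons] at *
    rw [ih]
    simp [pvPot, List.length_set]
    ring

theorem pvKids_pot (bnd : PySem.Set Int) (t : List String) (k : Int) (i : Nat) :
    pvStackPot (pvKids bnd t k i) < 5 ^ (t.length - i) := by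
  rw [pvKids]
  by_cases h : i < t.length
  · rw [dif_pos h, pvStackPot_append]
    have hrec := pvKids_pot bnd t k (i + 1)
    have hblock : pvStackPot (if PySem.Set.contains bnd (i : Int) then []
        else (pvChs.filter (fun c => c ≠ t.getD i "")).map (fun c => (t.set i c, k - 1, i + 1)))
        ≤ 4 * 5 ^ (t.length - (i + 1)) := by
      split
      · simp [pvStackPot]
      · rw [pvMapPot]
        have hlen : (pvChs.filter (fun c => c ≠ t.getD i "")).length ≤ 4 := by
          calc (pvChs.filter (fun c => c ≠ t.getD i "")).length ≤ pvChs.length :=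
                List.length_filter_le _ _
            _ = 4 := rfl
        exact Nat.mul_le_mul_right _ hlen
    have hexp : t.length - i = (t.length - (i + 1)) + 1 := by omega
    rw [hexp, pow_succ]
    omega
  · rw [dif_neg h]
    have h0 : pvStackPot ([] : List (List String × Int × Nat)) = 0 := rfl
    rw [h0]
    exact Nat.pow_pos (by omega)
termination_by t.length - i

-- the while loop: pop a frame, add its join, push its children
def runB (bnd : PySem.Set Int) (stack : List (List String × Int × Nat))
    (out : PySem.Set String) : PySem.Set String :=
  match stack with
  | [] => out
  | (t, k, start) :: rest =>
      let out1 := PySem.Set.add out (pvJoin t)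
      if k = 0 then runB bnd rest out1
      else runB bnd (pvKids bnd t k start ++ rest) out1
termination_by pvStackPot stack
decreasing_by
  · have h1 : 0 < pvPot (t, k, start) := Nat.pow_pos (by omega)
    simp only [pvStackPot, List.map_cons, List.sum_cons]
    omega
  · have h1 := pvKids_pot bnd t k start
    have h2 : pvPot (t, k, start) = 5 ^ (t.length - start) := rfl
    rw [pvStackPot_append]
    simp only [pvStackPot, List.map_cons, List.sum_cons] at *
    omega

def dClosure_alt (s : List String) (d : Int) (fixed : Option (List Int)) (res : Option (List String)) : List String :=
  let bnd : PySem.Set Int := match fixed with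
    | none => PySem.Set.empty
    | some l => if l.isEmpty then PySem.Set.empty else PySem.Set.ofList l
  let out : PySem.Set String := match res with
    | none => PySem.Set.empty
    | some l => if l.isEmpty then PySem.Set.empty else PySem.Set.ofList l
  runB bnd [(s, d, 0)] out

-- ===== PRECONDITION & SPEC =====
-- Pre_ excludes d = 0, on which Python A executes `return` and yields None instead of the set.
def Pre_dClosure (s : List String) (d : Int) (fixed : Option (List Int)) (res : Option (List String)) : Prop := d ≠ 0
instance (s : List String) (d : Int) (fixed : Option (List Int)) (res : Option (List String)) : Decidable (Pre_dClosure s d fixed res) := by unfold Pre_dClosure; infer_instance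
def pvWitness_dClosure : List String × Int × Option (List Int) × Option (List String) := (["A"], 1, none, none)

def Spec_dClosure (s : List String) (d : Int) (fixed : Option (List Int)) (res : Option (List String)) (out : List String) : Prop := out = dClosure_alt s d fixed res
instance (s : List String) (d : Int) (fixed : Option (List Int)) (res : Option (List String)) (out : List String) : Decidable (Spec_dClosure s d fixed res out) := by unfold Spec_dClosure; infer_instance

-- ===== CLAIM (what is proved, stated in full; the proofs are below) =====
def Claim_equal_dClosure : Prop := ∀ (s : List String) (d : Int) (fixed : Option (List Int)) (res : Option (List String)), Dom_dClosure s d fixed res → Pre_dClosure s d fixed res → Spec_dClosure s d fixed res (dClosure s d fixed res)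

-- ===== LEMMAS AND PROOFS =====

-- ---------- production lists: the sequences of strings each algorithm inserts into the set ----------
mutual
def prodA (s : List String) (d : Int) (F : List Int) : List String :=
  pvJoin s :: (if d = 0 then [] else ploopA s d F 0)
termination_by (pvFree s.length F, 2, 0)
decreasing_by all_goals (
  first
    | exact Prod.Lex.right _ (Prod.Lex.left _ _ (by omega))
    | exact Prod.Lex.right _ (Prod.Lex.right _ (by omega))
    | exact Prod.Lex.right _ (Prod.Lex.right _ (by simp only [List.length_cons]; omega))
    | exact Prod.Lex.right _ (Prod.Lex.right _ (Prod.Lex.left _ _ (by omega)))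
    | exact Prod.Lex.right _ (Prod.Lex.right _ (Prod.Lex.right _ (by omega)))
    | exact Prod.Lex.right _ (Prod.Lex.right _ (Prod.Lex.right _ (by simp only [List.length_cons]; omega)))
    | exact Prod.Lex.right _ (Prod.Lex.right _ (Prod.Lex.right _ (by simp only [pvChs, List.length_cons, List.length_nil]; omega)))
    | exact Prod.Lex.left _ _ (by omega)
    | exact Prod.Lex.left _ _ (by simp only [List.length_set]; omega)
    | (refine Prod.Lex.left _ _ ?_
       try simp only [List.length_set]
       refine pvFree_lt _ _ _ (by omega) (by rw [Bool.eq_false_iff]; assumption)))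
def ploopA (s : List String) (d : Int) (F : List Int) (i : Nat) : List String :=
  if h : i < s.length then
    (if hF : F.contains (i : Int) = true then [] else pchA s d F i h hF pvChs) ++ ploopA s d F (i + 1)
  else []
termination_by (pvFree s.length F, 1, s.length - i)
decreasing_by all_goals (
  first
    | exact Prod.Lex.right _ (Prod.Lex.left _ _ (by omega))
    | exact Prod.Lex.right _ (Prod.Lex.right _ (by omega))
    | exact Prod.Lex.right _ (Prod.Lex.right _ (by simp only [List.length_cons]; omega))
    | exact Prod.Lex.right _ (Prod.Lex.right _ (Prod.Lex.left _ _ (by omega)))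
    | exact Prod.Lex.right _ (Prod.Lex.right _ (Prod.Lex.right _ (by omega)))
    | exact Prod.Lex.right _ (Prod.Lex.right _ (Prod.Lex.right _ (by simp only [List.length_cons]; omega)))
    | exact Prod.Lex.right _ (Prod.Lex.right _ (Prod.Lex.right _ (by simp only [pvChs, List.length_cons, List.length_nil]; omega)))
    | exact Prod.Lex.left _ _ (by omega)
    | exact Prod.Lex.left _ _ (by simp only [List.length_set]; omega)
    | (refine Prod.Lex.left _ _ ?_
       try simp only [List.length_set]
       refine pvFree_lt _ _ _ (by omega) (by rw [Bool.eq_false_iff]; assumption)))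
def pchA (s : List String) (d : Int) (F : List Int) (i : Nat) (h : i < s.length)
    (hF : ¬ F.contains (i : Int) = true) (cs : List String) : List String :=
  match cs with
  | [] => []
  | c :: rest =>
      (if c ≠ s.getD i "" then prodA (s.set i c) (d - 1) (F ++ [(i : Int)]) else []) ++
        pchA s d F i h hF rest
termination_by (pvFree s.length F, 0, cs.length)
decreasing_by all_goals (
  first
    | exact Prod.Lex.right _ (Prod.Lex.left _ _ (by omega))
    | exact Prod.Lex.right _ (Prod.Lex.right _ (by omega))
    | exact Prod.Lex.right _ (Prod.Lex.right _ (by simp only [List.length_cons]; omega))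
    | exact Prod.Lex.right _ (Prod.Lex.right _ (Prod.Lex.left _ _ (by omega)))
    | exact Prod.Lex.right _ (Prod.Lex.right _ (Prod.Lex.right _ (by omega)))
    | exact Prod.Lex.right _ (Prod.Lex.right _ (Prod.Lex.right _ (by simp only [List.length_cons]; omega)))
    | exact Prod.Lex.right _ (Prod.Lex.right _ (Prod.Lex.right _ (by simp only [pvChs, List.length_cons, List.length_nil]; omega)))
    | exact Prod.Lex.left _ _ (by omega)
    | exact Prod.Lex.left _ _ (by simp only [List.length_set]; omega)
    | (refine Prod.Lex.left _ _ ?_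
       try simp only [List.length_set]
       refine pvFree_lt _ _ _ (by omega) (by rw [Bool.eq_false_iff]; assumption)))
end

mutual
def prodB (bnd : PySem.Set Int) (s : List String) (k : Int) (start : Nat) : List String :=
  pvJoin s :: (if k = 0 then [] else ploopB bnd s k start)
termination_by (s.length - start, 2, 0)
decreasing_by all_goals (
  first
    | exact Prod.Lex.right _ (Prod.Lex.left _ _ (by omega))
    | exact Prod.Lex.right _ (Prod.Lex.right _ (by omega))
    | exact Prod.Lex.right _ (Prod.Lex.right _ (by simp only [List.length_cons]; omega))
    | exact Prod.Lex.right _ (Prod.Lex.right _ (Prod.Lex.left _ _ (by omega)))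
    | exact Prod.Lex.right _ (Prod.Lex.right _ (Prod.Lex.right _ (by omega)))
    | exact Prod.Lex.right _ (Prod.Lex.right _ (Prod.Lex.right _ (by simp only [List.length_cons]; omega)))
    | exact Prod.Lex.right _ (Prod.Lex.right _ (Prod.Lex.right _ (by simp only [pvChs, List.length_cons, List.length_nil]; omega)))
    | exact Prod.Lex.left _ _ (by omega)
    | exact Prod.Lex.left _ _ (by simp only [List.length_set]; omega)
    | (refine Prod.Lex.left _ _ ?_
       try simp only [List.length_set]
       refine pvFree_lt _ _ _ (by omega) (by rw [Bool.eq_false_iff]; assumption)))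
def ploopB (bnd : PySem.Set Int) (s : List String) (k : Int) (i : Nat) : List String :=
  if h : i < s.length then
    (if PySem.Set.contains bnd (i : Int) then [] else pchB bnd s k i h pvChs) ++ ploopB bnd s k (i + 1)
  else []
termination_by (s.length - i, 1, 0)
decreasing_by all_goals (
  first
    | exact Prod.Lex.right _ (Prod.Lex.left _ _ (by omega))
    | exact Prod.Lex.right _ (Prod.Lex.right _ (by omega))
    | exact Prod.Lex.right _ (Prod.Lex.right _ (by simp only [List.length_cons]; omega))
    | exact Prod.Lex.right _ (Prod.Lex.right _ (Prod.Lex.left _ _ (by omega)))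
    | exact Prod.Lex.right _ (Prod.Lex.right _ (Prod.Lex.right _ (by omega)))
    | exact Prod.Lex.right _ (Prod.Lex.right _ (Prod.Lex.right _ (by simp only [List.length_cons]; omega)))
    | exact Prod.Lex.right _ (Prod.Lex.right _ (Prod.Lex.right _ (by simp only [pvChs, List.length_cons, List.length_nil]; omega)))
    | exact Prod.Lex.left _ _ (by omega)
    | exact Prod.Lex.left _ _ (by simp only [List.length_set]; omega)
    | (refine Prod.Lex.left _ _ ?_
       try simp only [List.length_set]
       refine pvFree_lt _ _ _ (by omega) (by rw [Bool.eq_false_iff]; assumption)))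
def pchB (bnd : PySem.Set Int) (s : List String) (k : Int) (i : Nat) (h : i < s.length)
    (cs : List String) : List String :=
  match cs with
  | [] => []
  | c :: rest =>
      (if c ≠ s.getD i "" then prodB bnd (s.set i c) (k - 1) (i + 1) else []) ++ pchB bnd s k i h rest
termination_by (s.length - i, 0, cs.length)
decreasing_by all_goals (
  first
    | exact Prod.Lex.right _ (Prod.Lex.left _ _ (by omega))
    | exact Prod.Lex.right _ (Prod.Lex.right _ (by omega))
    | exact Prod.Lex.right _ (Prod.Lex.right _ (by simp only [List.length_cons]; omega))
    | exact Prod.Lex.right _ (Prod.Lex.right _ (Prod.Lex.left _ _ (by omega)))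
    | exact Prod.Lex.right _ (Prod.Lex.right _ (Prod.Lex.right _ (by omega)))
    | exact Prod.Lex.right _ (Prod.Lex.right _ (Prod.Lex.right _ (by simp only [List.length_cons]; omega)))
    | exact Prod.Lex.right _ (Prod.Lex.right _ (Prod.Lex.right _ (by simp only [pvChs, List.length_cons, List.length_nil]; omega)))
    | exact Prod.Lex.left _ _ (by omega)
    | exact Prod.Lex.left _ _ (by simp only [List.length_set]; omega)
    | (refine Prod.Lex.left _ _ ?_
       try simp only [List.length_set]
       refine pvFree_lt _ _ _ (by omega) (by rw [Bool.eq_false_iff]; assumption)))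
end

-- ---------- small PySem.Set facts ----------
theorem pv_add_of_mem {α : Type} [BEq α] [LawfulBEq α] (s : PySem.Set α) (x : α) (hx : x ∈ s) :
    PySem.Set.add s x = s := by
  simp [PySem.Set.add, PySem.Set.contains, List.contains_eq_mem, hx]

theorem pv_mem_add_left {α : Type} [BEq α] [LawfulBEq α] (s : PySem.Set α) (x y : α) (hy : y ∈ s) :
    y ∈ PySem.Set.add s x := (PySem.Set.mem_add s x y).mpr (Or.inl hy)

theorem pv_mem_update {α : Type} [BEq α] [LawfulBEq α] (s : PySem.Set α) (L : List α) (y : α) :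
    y ∈ PySem.Set.update s L ↔ y ∈ s ∨ y ∈ L := by
  induction L generalizing s with
  | nil => simp [PySem.Set.update_nil]
  | cons a t ih =>
    rw [PySem.Set.update_cons, ih]
    simp [PySem.Set.mem_add]
    tauto

theorem pv_update_eq_self {α : Type} [BEq α] [LawfulBEq α] (s : PySem.Set α) (L : List α)
    (h : ∀ x ∈ L, x ∈ s) : PySem.Set.update s L = s := by
  induction L generalizing s with
  | nil => exact PySem.Set.update_nil s
  | cons a t ih =>
    rw [PySem.Set.update_cons, pv_add_of_mem s a (h a List.mem_cons_self)]
    exact ih s (fun x hx => h x (List.mem_cons_of_mem _ hx))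

-- ---------- port A computes: result = update of res by the production list ----------
mutual
theorem goA_eq (s : List String) (d : Int) (F : List Int) (R : PySem.Set String) :
    goA s d F R = PySem.Set.update R (prodA s d F) := by
  rw [goA, prodA, PySem.Set.update_cons]
  by_cases hd : d = 0
  · simp only [hd, if_true, if_pos rfl, PySem.Set.update_nil]
  · simp only [if_neg hd]
    exact loopA_eq s d F 0 _
termination_by (pvFree s.length F, 2, 0)
decreasing_by all_goals (
  first
    | exact Prod.Lex.right _ (Prod.Lex.left _ _ (by omega))
    | exact Prod.Lex.right _ (Prod.Lex.right _ (by omega))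
    | exact Prod.Lex.right _ (Prod.Lex.right _ (by simp only [List.length_cons]; omega))
    | exact Prod.Lex.right _ (Prod.Lex.right _ (Prod.Lex.left _ _ (by omega)))
    | exact Prod.Lex.right _ (Prod.Lex.right _ (Prod.Lex.right _ (by omega)))
    | exact Prod.Lex.right _ (Prod.Lex.right _ (Prod.Lex.right _ (by simp only [List.length_cons]; omega)))
    | exact Prod.Lex.right _ (Prod.Lex.right _ (Prod.Lex.right _ (by simp only [pvChs, List.length_cons, List.length_nil]; omega)))
    | exact Prod.Lex.left _ _ (by omega)
    | exact Prod.Lex.left _ _ (by simp only [List.length_set]; omega)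
    | (refine Prod.Lex.left _ _ ?_
       try simp only [List.length_set]
       refine pvFree_lt _ _ _ (by omega) (by rw [Bool.eq_false_iff]; assumption)))
theorem loopA_eq (s : List String) (d : Int) (F : List Int) (i : Nat) (R : PySem.Set String) :
    loopA s d F i R = PySem.Set.update R (ploopA s d F i) := by
  rw [loopA, ploopA]
  by_cases h : i < s.length
  · rw [dif_pos h, dif_pos h, PySem.Set.update_append, loopA_eq s d F (i + 1)]
    by_cases hF : F.contains (i : Int) = true
    · rw [dif_pos hF, dif_pos hF, PySem.Set.update_nil]
    · rw [dif_neg hF, dif_neg hF, chloopA_eq s d F i h hF pvChs R]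
  · rw [dif_neg h, dif_neg h, PySem.Set.update_nil]
termination_by (pvFree s.length F, 1, s.length - i)
decreasing_by all_goals (
  first
    | exact Prod.Lex.right _ (Prod.Lex.left _ _ (by omega))
    | exact Prod.Lex.right _ (Prod.Lex.right _ (by omega))
    | exact Prod.Lex.right _ (Prod.Lex.right _ (by simp only [List.length_cons]; omega))
    | exact Prod.Lex.right _ (Prod.Lex.right _ (Prod.Lex.left _ _ (by omega)))
    | exact Prod.Lex.right _ (Prod.Lex.right _ (Prod.Lex.right _ (by omega)))
    | exact Prod.Lex.right _ (Prod.Lex.right _ (Prod.Lex.right _ (by simp only [List.length_cons]; omega)))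
    | exact Prod.Lex.right _ (Prod.Lex.right _ (Prod.Lex.right _ (by simp only [pvChs, List.length_cons, List.length_nil]; omega)))
    | exact Prod.Lex.left _ _ (by omega)
    | exact Prod.Lex.left _ _ (by simp only [List.length_set]; omega)
    | (refine Prod.Lex.left _ _ ?_
       try simp only [List.length_set]
       refine pvFree_lt _ _ _ (by omega) (by rw [Bool.eq_false_iff]; assumption)))
theorem chloopA_eq (s : List String) (d : Int) (F : List Int) (i : Nat) (h : i < s.length)
    (hF : ¬ F.contains (i : Int) = true) (cs : List String) (R : PySem.Set String) :
    chloopA s d F i h hF cs R = PySem.Set.update R (pchA s d F i h hF cs) := by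
  match cs with
  | [] => rw [chloopA, pchA, PySem.Set.update_nil]
  | c :: rest =>
    rw [chloopA, pchA, PySem.Set.update_append, chloopA_eq s d F i h hF rest]
    by_cases hc : c ≠ s.getD i ""
    · rw [if_pos hc, if_pos hc, goA_eq (s.set i c) (d - 1) (F ++ [(i : Int)]) R]
    · rw [if_neg hc, if_neg hc, PySem.Set.update_nil]
termination_by (pvFree s.length F, 0, cs.length)
decreasing_by all_goals (
  first
    | exact Prod.Lex.right _ (Prod.Lex.left _ _ (by omega))
    | exact Prod.Lex.right _ (Prod.Lex.right _ (by omega))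
    | exact Prod.Lex.right _ (Prod.Lex.right _ (by simp only [List.length_cons]; omega))
    | exact Prod.Lex.right _ (Prod.Lex.right _ (Prod.Lex.left _ _ (by omega)))
    | exact Prod.Lex.right _ (Prod.Lex.right _ (Prod.Lex.right _ (by omega)))
    | exact Prod.Lex.right _ (Prod.Lex.right _ (Prod.Lex.right _ (by simp only [List.length_cons]; omega)))
    | exact Prod.Lex.right _ (Prod.Lex.right _ (Prod.Lex.right _ (by simp only [pvChs, List.length_cons, List.length_nil]; omega)))
    | exact Prod.Lex.left _ _ (by omega)
    | exact Prod.Lex.left _ _ (by simp only [List.length_set]; omega)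
    | (refine Prod.Lex.left _ _ ?_
       try simp only [List.length_set]
       refine pvFree_lt _ _ _ (by omega) (by rw [Bool.eq_false_iff]; assumption)))
end

-- ---------- port B computes: the stack machine realises the prodB production lists ----------
def pvFProd (bnd : PySem.Set Int) (f : List String × Int × Nat) : List String :=
  prodB bnd f.1 f.2.1 f.2.2

theorem pvKids_flat (bnd : PySem.Set Int) (t : List String) (k : Int) (i : Nat) :
    (pvKids bnd t k i).flatMap (pvFProd bnd) = ploopB bnd t k i := by
  rw [pvKids, ploopB]
  by_cases h : i < t.length
  · rw [dif_pos h, dif_pos h, List.flatMap_append, pvKids_flat bnd t k (i + 1)]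
    congr 1
    by_cases hb : PySem.Set.contains bnd (i : Int) = true
    · rw [if_pos hb, if_pos hb]
      rfl
    · rw [if_neg hb, if_neg hb]
      have hcs : ∀ cs : List String,
          ((cs.filter (fun c => c ≠ t.getD i "")).map (fun c => (t.set i c, k - 1, i + 1))).flatMap
            (pvFProd bnd) = pchB bnd t k i h cs := by
        intro cs
        induction cs with
        | nil => rw [pchB]; rfl
        | cons c rest ih =>
          rw [pchB, List.filter_cons]
          by_cases hc : c ≠ t.getD i ""
          · rw [if_pos (decide_eq_true hc), List.map_cons, List.flatMap_cons, ih, if_pos hc]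
            rfl
          · rw [if_neg (fun hdec => hc (of_decide_eq_true hdec)), ih, if_neg hc,
              List.nil_append]
      exact hcs pvChs
  · rw [dif_neg h, dif_neg h]
    rfl
termination_by t.length - i

theorem runB_eq (bnd : PySem.Set Int) (fs rest : List (List String × Int × Nat))
    (out : PySem.Set String) :
    runB bnd (fs ++ rest) out = runB bnd rest (PySem.Set.update out (fs.flatMap (pvFProd bnd))) := by
  match fs with
  | [] => rw [List.nil_append, List.flatMap_nil, PySem.Set.update_nil]
  | (t, k, start) :: fs' =>
    rw [List.cons_append, runB, List.flatMap_cons]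
    by_cases hk : k = 0
    · rw [if_pos hk, runB_eq bnd fs' rest]
      have hp : pvFProd bnd (t, k, start) = [pvJoin t] := by
        simp [pvFProd, prodB, hk]
      rw [hp, List.cons_append, PySem.Set.update_cons, List.nil_append]
    · rw [if_neg hk, ← List.append_assoc, runB_eq bnd (pvKids bnd t k start ++ fs') rest]
      have hp : pvFProd bnd (t, k, start) = pvJoin t :: ploopB bnd t k start := by
        simp [pvFProd, prodB, hk]
      rw [hp, List.cons_append, PySem.Set.update_cons, List.flatMap_append,
        pvKids_flat bnd t k start]
termination_by pvStackPot fs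
decreasing_by
  · have h1 : 0 < pvPot (t, k, start) := Nat.pow_pos (by omega)
    simp only [pvStackPot, List.map_cons, List.sum_cons]
    omega
  · have h1 := pvKids_pot bnd t k start
    have h2 : pvPot (t, k, start) = 5 ^ (t.length - start) := rfl
    rw [pvStackPot_append]
    simp only [pvStackPot, List.map_cons, List.sum_cons] at *
    omega

theorem runB_single (bnd : PySem.Set Int) (s : List String) (d : Int) (out : PySem.Set String) :
    runB bnd [(s, d, 0)] out = PySem.Set.update out (prodB bnd s d 0) := by
  have h := runB_eq bnd [(s, d, 0)] [] out
  simp only [List.append_nil, List.flatMap_cons, List.flatMap_nil, List.append_nil] at h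
  rw [h, runB]
  rfl

-- ---------- A's production list only depends on the fixed list through membership ----------
theorem pv_contains_append (F : List Int) (a j : Int) :
    (F ++ [a]).contains j = (F.contains j || decide (j = a)) := by
  simp [List.contains_eq_mem, List.mem_append]

mutual
theorem prodA_perm (s : List String) (d : Int) (F₁ F₂ : List Int)
    (hc : ∀ j : Int, F₁.contains j = F₂.contains j) : prodA s d F₁ = prodA s d F₂ := by
  rw [prodA, prodA]
  by_cases hd : d = 0
  · simp [hd]
  · simp only [if_neg hd]
    rw [ploopA_perm s d F₁ F₂ 0 hc]
termination_by (pvFree s.length F₁, 2, 0)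
decreasing_by all_goals (
  first
    | exact Prod.Lex.right _ (Prod.Lex.left _ _ (by omega))
    | exact Prod.Lex.right _ (Prod.Lex.right _ (by omega))
    | exact Prod.Lex.right _ (Prod.Lex.right _ (by simp only [List.length_cons]; omega))
    | exact Prod.Lex.right _ (Prod.Lex.right _ (Prod.Lex.left _ _ (by omega)))
    | exact Prod.Lex.right _ (Prod.Lex.right _ (Prod.Lex.right _ (by omega)))
    | exact Prod.Lex.right _ (Prod.Lex.right _ (Prod.Lex.right _ (by simp only [List.length_cons]; omega)))
    | exact Prod.Lex.right _ (Prod.Lex.right _ (Prod.Lex.right _ (by simp only [pvChs, List.length_cons, List.length_nil]; omega)))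
    | exact Prod.Lex.left _ _ (by omega)
    | exact Prod.Lex.left _ _ (by simp only [List.length_set]; omega)
    | (refine Prod.Lex.left _ _ ?_
       try simp only [List.length_set]
       refine pvFree_lt _ _ _ (by omega) (by rw [Bool.eq_false_iff]; assumption)))
theorem ploopA_perm (s : List String) (d : Int) (F₁ F₂ : List Int) (i : Nat)
    (hc : ∀ j : Int, F₁.contains j = F₂.contains j) : ploopA s d F₁ i = ploopA s d F₂ i := by
  conv_lhs => rw [ploopA]
  conv_rhs => rw [ploopA]
  by_cases h : i < s.length
  · rw [dif_pos h, dif_pos h, ploopA_perm s d F₁ F₂ (i + 1) hc]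
    by_cases hF : F₁.contains (i : Int) = true
    · rw [dif_pos hF, dif_pos ((hc (i : Int)) ▸ hF)]
    · rw [dif_neg hF, dif_neg ((hc (i : Int)) ▸ hF), pchA_perm s d F₁ F₂ i h hF _ pvChs hc]
  · rw [dif_neg h, dif_neg h]
termination_by (pvFree s.length F₁, 1, s.length - i)
decreasing_by all_goals (
  first
    | exact Prod.Lex.right _ (Prod.Lex.left _ _ (by omega))
    | exact Prod.Lex.right _ (Prod.Lex.right _ (by omega))
    | exact Prod.Lex.right _ (Prod.Lex.right _ (by simp only [List.length_cons]; omega))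
    | exact Prod.Lex.right _ (Prod.Lex.right _ (Prod.Lex.left _ _ (by omega)))
    | exact Prod.Lex.right _ (Prod.Lex.right _ (Prod.Lex.right _ (by omega)))
    | exact Prod.Lex.right _ (Prod.Lex.right _ (Prod.Lex.right _ (by simp only [List.length_cons]; omega)))
    | exact Prod.Lex.right _ (Prod.Lex.right _ (Prod.Lex.right _ (by simp only [pvChs, List.length_cons, List.length_nil]; omega)))
    | exact Prod.Lex.left _ _ (by omega)
    | exact Prod.Lex.left _ _ (by simp only [List.length_set]; omega)
    | (refine Prod.Lex.left _ _ ?_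
       try simp only [List.length_set]
       refine pvFree_lt _ _ _ (by omega) (by rw [Bool.eq_false_iff]; assumption)))
theorem pchA_perm (s : List String) (d : Int) (F₁ F₂ : List Int) (i : Nat) (h : i < s.length)
    (hF₁ : ¬ F₁.contains (i : Int) = true) (hF₂ : ¬ F₂.contains (i : Int) = true) (cs : List String)
    (hc : ∀ j : Int, F₁.contains j = F₂.contains j) :
    pchA s d F₁ i h hF₁ cs = pchA s d F₂ i h hF₂ cs := by
  match cs with
  | [] => rw [pchA, pchA]
  | c :: rest =>
    conv_lhs => rw [pchA]
    conv_rhs => rw [pchA]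
    rw [pchA_perm s d F₁ F₂ i h hF₁ hF₂ rest hc]
    by_cases hcne : c ≠ s.getD i ""
    · rw [if_pos hcne, if_pos hcne,
        prodA_perm (s.set i c) (d - 1) (F₁ ++ [(i : Int)]) (F₂ ++ [(i : Int)])
          (fun j => by rw [pv_contains_append, pv_contains_append, hc j])]
    · rw [if_neg hcne, if_neg hcne]
termination_by (pvFree s.length F₁, 0, cs.length)
decreasing_by all_goals (
  first
    | exact Prod.Lex.right _ (Prod.Lex.left _ _ (by omega))
    | exact Prod.Lex.right _ (Prod.Lex.right _ (by omega))
    | exact Prod.Lex.right _ (Prod.Lex.right _ (by simp only [List.length_cons]; omega))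
    | exact Prod.Lex.right _ (Prod.Lex.right _ (Prod.Lex.left _ _ (by omega)))
    | exact Prod.Lex.right _ (Prod.Lex.right _ (Prod.Lex.right _ (by omega)))
    | exact Prod.Lex.right _ (Prod.Lex.right _ (Prod.Lex.right _ (by simp only [List.length_cons]; omega)))
    | exact Prod.Lex.right _ (Prod.Lex.right _ (Prod.Lex.right _ (by simp only [pvChs, List.length_cons, List.length_nil]; omega)))
    | exact Prod.Lex.left _ _ (by omega)
    | exact Prod.Lex.left _ _ (by simp only [List.length_set]; omega)
    | (refine Prod.Lex.left _ _ ?_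
       try simp only [List.length_set]
       refine pvFree_lt _ _ _ (by omega) (by rw [Bool.eq_false_iff]; assumption)))
end

-- ---------- membership facts about the production lists ----------
theorem ploopA_stop (s : List String) (d : Int) (F : List Int) (i : Nat) (h : ¬ i < s.length) :
    ploopA s d F i = [] := by rw [ploopA, dif_neg h]

theorem mem_pchA_intro (s : List String) (d : Int) (F : List Int) (i : Nat) (h : i < s.length)
    (hF : ¬ F.contains (i : Int) = true) (cs : List String) (c : String) (w : String)
    (hcm : c ∈ cs) (hne : c ≠ s.getD i "") (hw : w ∈ prodA (s.set i c) (d - 1) (F ++ [(i : Int)])) :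
    w ∈ pchA s d F i h hF cs := by
  induction cs with
  | nil => cases hcm
  | cons a rest ih =>
    rw [pchA]
    rcases List.mem_cons.mp hcm with rfl | hrest
    · exact List.mem_append_left _ (by rw [if_pos hne]; exact hw)
    · exact List.mem_append_right _ (ih hrest)

theorem mem_pchA_elim (s : List String) (d : Int) (F : List Int) (i : Nat) (h : i < s.length)
    (hF : ¬ F.contains (i : Int) = true) (cs : List String) (w : String)
    (hw : w ∈ pchA s d F i h hF cs) :
    ∃ c ∈ cs, c ≠ s.getD i "" ∧ w ∈ prodA (s.set i c) (d - 1) (F ++ [(i : Int)]) := by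
  induction cs with
  | nil => rw [pchA] at hw; cases hw
  | cons a rest ih =>
    rw [pchA] at hw
    rcases List.mem_append.mp hw with hl | hr
    · by_cases hne : a ≠ s.getD i ""
      · rw [if_pos hne] at hl
        exact ⟨a, List.mem_cons_self, hne, hl⟩
      · rw [if_neg hne] at hl; cases hl
    · obtain ⟨c, hcm, hcne, hcw⟩ := ih hr
      exact ⟨c, List.mem_cons_of_mem _ hcm, hcne, hcw⟩

theorem ploopA_mono (s : List String) (d : Int) (F : List Int) (i : Nat) (w : String)
    (hw : w ∈ ploopA s d F (i + 1)) : w ∈ ploopA s d F i := by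
  by_cases h : i < s.length
  · rw [ploopA, dif_pos h]
    exact List.mem_append_right _ hw
  · have h1 : ¬ i + 1 < s.length := by omega
    rw [ploopA_stop s d F (i + 1) h1] at hw
    cases hw

theorem ploopA_ge (s : List String) (d : Int) (F : List Int) (i i0 : Nat) (hle : i ≤ i0)
    (w : String) (hw : w ∈ ploopA s d F i0) : w ∈ ploopA s d F i := by
  induction i0, hle using Nat.le_induction with
  | base => exact hw
  | succ m hm ih => exact ih (ploopA_mono s d F m w hw)

theorem pv_branch_mem (s : List String) (d : Int) (F : List Int) (i : Nat) (c : String) (w : String)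
    (hd : d ≠ 0) (h : i < s.length) (hF : ¬ F.contains (i : Int) = true) (hc : c ∈ pvChs)
    (hne : c ≠ s.getD i "") (hw : w ∈ prodA (s.set i c) (d - 1) (F ++ [(i : Int)])) :
    w ∈ prodA s d F := by
  rw [prodA, if_neg hd]
  refine List.mem_cons_of_mem _ (ploopA_ge s d F 0 i (Nat.zero_le i) w ?_)
  rw [ploopA, dif_pos h, dif_neg hF]
  exact List.mem_append_left _ (mem_pchA_intro s d F i h hF pvChs c w hc hne hw)

theorem ploopB_stop (bnd : PySem.Set Int) (s : List String) (k : Int) (i : Nat)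
    (h : ¬ i < s.length) : ploopB bnd s k i = [] := by rw [ploopB, dif_neg h]

-- ---------- the main lemma: both productions update a set identically ----------
mutual
theorem pvMain (s : List String) (d : Int) (F' : List Int) (FB : PySem.Set Int) (start : Nat)
    (res : PySem.Set String)
    (CS : ∀ i : Nat, start ≤ i → F'.contains (i : Int) = PySem.Set.contains FB (i : Int))
    (H : d ≠ 0 → ∀ (j : Nat) (c w : String), j < start → j < s.length →
      ¬ F'.contains (j : Int) = true → c ∈ pvChs → c ≠ s.getD j "" →
      w ∈ prodA (s.set j c) (d - 1) (F' ++ [(j : Int)]) → w ∈ res) :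
    PySem.Set.update res (prodA s d F') = PySem.Set.update res (prodB FB s d start) := by
  rw [prodA, prodB, PySem.Set.update_cons, PySem.Set.update_cons]
  by_cases hd : d = 0
  · rw [if_pos hd, if_pos hd]
  · rw [if_neg hd, if_neg hd]
    have H1 : ∀ (j : Nat) (c w : String), j < start → j < s.length →
        ¬ F'.contains (j : Int) = true → c ∈ pvChs → c ≠ s.getD j "" →
        w ∈ prodA (s.set j c) (d - 1) (F' ++ [(j : Int)]) →
        w ∈ PySem.Set.add res (pvJoin s) :=
      fun j c w h1 h2 h3 h4 h5 h6 =>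
        pv_mem_add_left res (pvJoin s) w (H hd j c w h1 h2 h3 h4 h5 h6)
    calc PySem.Set.update (PySem.Set.add res (pvJoin s)) (ploopA s d F' 0)
        = PySem.Set.update (PySem.Set.add res (pvJoin s)) (ploopA s d F' start) :=
          pvEarly s d F' start hd 0 (Nat.zero_le start) _ H1
      _ = PySem.Set.update (PySem.Set.add res (pvJoin s)) (ploopB FB s d start) :=
          pvLS s d F' FB start hd CS start le_rfl _
            (fun j c w h1 h2 h3 h4 h5 h6 => H1 j c w h1 h2 h3 h4 h5 h6)
termination_by (pvFree s.length F', 1, 0, 0)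
decreasing_by all_goals (
  first
    | exact Prod.Lex.right _ (Prod.Lex.left _ _ (by omega))
    | exact Prod.Lex.right _ (Prod.Lex.right _ (by omega))
    | exact Prod.Lex.right _ (Prod.Lex.right _ (by simp only [List.length_cons]; omega))
    | exact Prod.Lex.right _ (Prod.Lex.right _ (Prod.Lex.left _ _ (by omega)))
    | exact Prod.Lex.right _ (Prod.Lex.right _ (Prod.Lex.right _ (by omega)))
    | exact Prod.Lex.right _ (Prod.Lex.right _ (Prod.Lex.right _ (by simp only [List.length_cons]; omega)))
    | exact Prod.Lex.right _ (Prod.Lex.right _ (Prod.Lex.right _ (by simp only [pvChs, List.length_cons, List.length_nil]; omega)))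
    | exact Prod.Lex.left _ _ (by omega)
    | exact Prod.Lex.left _ _ (by simp only [List.length_set]; omega)
    | (refine Prod.Lex.left _ _ ?_
       try simp only [List.length_set]
       refine pvFree_lt _ _ _ (by omega) (by rw [Bool.eq_false_iff]; assumption)))
theorem pvEarly (s : List String) (d : Int) (F' : List Int) (start : Nat) (hd : d ≠ 0)
    (i : Nat) (hi : i ≤ start) (res2 : PySem.Set String)
    (H2 : ∀ (j : Nat) (c w : String), j < start → j < s.length →
      ¬ F'.contains (j : Int) = true → c ∈ pvChs → c ≠ s.getD j "" →
      w ∈ prodA (s.set j c) (d - 1) (F' ++ [(j : Int)]) → w ∈ res2) :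
    PySem.Set.update res2 (ploopA s d F' i) = PySem.Set.update res2 (ploopA s d F' start) := by
  by_cases heq : i = start
  · rw [heq]
  · have hlt : i < start := by omega
    by_cases h : i < s.length
    · rw [ploopA, dif_pos h, PySem.Set.update_append]
      have hchunk : ∀ chunk, chunk = (if hF : F'.contains (i : Int) = true then []
            else pchA s d F' i h hF pvChs) → PySem.Set.update res2 chunk = res2 := by
        intro chunk hc
        by_cases hF : F'.contains (i : Int) = true
        · rw [hc, dif_pos hF, PySem.Set.update_nil]
        · rw [hc, dif_neg hF]
          refine pv_update_eq_self res2 _ (fun w hw => ?_)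
          obtain ⟨c, hcm, hcne, hcw⟩ := mem_pchA_elim s d F' i h hF pvChs w hw
          exact H2 i c w hlt h hF hcm hcne hcw
      rw [hchunk _ rfl]
      exact pvEarly s d F' start hd (i + 1) (by omega) res2 H2
    · rw [ploopA_stop s d F' i h, ploopA_stop s d F' start (by omega)]
termination_by (pvFree s.length F', 0, start - i, 0)
decreasing_by all_goals (
  first
    | exact Prod.Lex.right _ (Prod.Lex.left _ _ (by omega))
    | exact Prod.Lex.right _ (Prod.Lex.right _ (by omega))
    | exact Prod.Lex.right _ (Prod.Lex.right _ (by simp only [List.length_cons]; omega))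
    | exact Prod.Lex.right _ (Prod.Lex.right _ (Prod.Lex.left _ _ (by omega)))
    | exact Prod.Lex.right _ (Prod.Lex.right _ (Prod.Lex.right _ (by omega)))
    | exact Prod.Lex.right _ (Prod.Lex.right _ (Prod.Lex.right _ (by simp only [List.length_cons]; omega)))
    | exact Prod.Lex.right _ (Prod.Lex.right _ (Prod.Lex.right _ (by simp only [pvChs, List.length_cons, List.length_nil]; omega)))
    | exact Prod.Lex.left _ _ (by omega)
    | exact Prod.Lex.left _ _ (by simp only [List.length_set]; omega)
    | (refine Prod.Lex.left _ _ ?_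
       try simp only [List.length_set]
       refine pvFree_lt _ _ _ (by omega) (by rw [Bool.eq_false_iff]; assumption)))
theorem pvLS (s : List String) (d : Int) (F' : List Int) (FB : PySem.Set Int) (start : Nat)
    (hd : d ≠ 0)
    (CS : ∀ i : Nat, start ≤ i → F'.contains (i : Int) = PySem.Set.contains FB (i : Int))
    (i : Nat) (hi : start ≤ i) (res2 : PySem.Set String)
    (Inv : ∀ (j : Nat) (c w : String), j < i → j < s.length →
      ¬ F'.contains (j : Int) = true → c ∈ pvChs → c ≠ s.getD j "" →
      w ∈ prodA (s.set j c) (d - 1) (F' ++ [(j : Int)]) → w ∈ res2) :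
    PySem.Set.update res2 (ploopA s d F' i) = PySem.Set.update res2 (ploopB FB s d i) := by
  by_cases h : i < s.length
  · rw [ploopA, ploopB, dif_pos h, dif_pos h, PySem.Set.update_append, PySem.Set.update_append]
    have hg : F'.contains (i : Int) = PySem.Set.contains FB (i : Int) := CS i hi
    by_cases hF : F'.contains (i : Int) = true
    · rw [dif_pos hF, if_pos (hg ▸ hF), PySem.Set.update_nil]
      exact pvLS s d F' FB start hd CS (i + 1) (by omega) res2
        (fun j c w h1 h2 h3 h4 h5 h6 => by
          by_cases hj : j = i
          · subst hj; exact absurd hF h3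
          · exact Inv j c w (by omega) h2 h3 h4 h5 h6)
    · rw [dif_neg hF, if_neg (hg ▸ hF)]
      have hch := pvCh s d F' FB start hd CS i hi h hF pvChs (fun c hc => hc) res2 Inv
      rw [hch]
      refine pvLS s d F' FB start hd CS (i + 1) (by omega)
        (PySem.Set.update res2 (pchB FB s d i h pvChs)) ?_
      intro j c w h1 h2 h3 h4 h5 h6
      by_cases hj : j = i
      · subst hj
        rw [← hch]
        exact (pv_mem_update res2 _ w).mpr
          (Or.inr (mem_pchA_intro s d F' j h h3 pvChs c w h4 h5 h6))
      · exact (pv_mem_update res2 _ w).mpr (Or.inl (Inv j c w (by omega) h2 h3 h4 h5 h6))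
  · rw [ploopA_stop s d F' i h, ploopB_stop FB s d i h]
termination_by (pvFree s.length F', 0, s.length - i, 5)
decreasing_by all_goals (
  first
    | exact Prod.Lex.right _ (Prod.Lex.left _ _ (by omega))
    | exact Prod.Lex.right _ (Prod.Lex.right _ (by omega))
    | exact Prod.Lex.right _ (Prod.Lex.right _ (by simp only [List.length_cons]; omega))
    | exact Prod.Lex.right _ (Prod.Lex.right _ (Prod.Lex.left _ _ (by omega)))
    | exact Prod.Lex.right _ (Prod.Lex.right _ (Prod.Lex.right _ (by omega)))
    | exact Prod.Lex.right _ (Prod.Lex.right _ (Prod.Lex.right _ (by simp only [List.length_cons]; omega)))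
    | exact Prod.Lex.right _ (Prod.Lex.right _ (Prod.Lex.right _ (by simp only [pvChs, List.length_cons, List.length_nil]; omega)))
    | exact Prod.Lex.left _ _ (by omega)
    | exact Prod.Lex.left _ _ (by simp only [List.length_set]; omega)
    | (refine Prod.Lex.left _ _ ?_
       try simp only [List.length_set]
       refine pvFree_lt _ _ _ (by omega) (by rw [Bool.eq_false_iff]; assumption)))
theorem pvCh (s : List String) (d : Int) (F' : List Int) (FB : PySem.Set Int) (start : Nat)
    (hd : d ≠ 0)
    (CS : ∀ i : Nat, start ≤ i → F'.contains (i : Int) = PySem.Set.contains FB (i : Int))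
    (i : Nat) (hi : start ≤ i) (h : i < s.length) (hF : ¬ F'.contains (i : Int) = true)
    (cs : List String) (hcs : ∀ c ∈ cs, c ∈ pvChs) (res2 : PySem.Set String)
    (Inv : ∀ (j : Nat) (c w : String), j < i → j < s.length →
      ¬ F'.contains (j : Int) = true → c ∈ pvChs → c ≠ s.getD j "" →
      w ∈ prodA (s.set j c) (d - 1) (F' ++ [(j : Int)]) → w ∈ res2) :
    PySem.Set.update res2 (pchA s d F' i h hF cs) = PySem.Set.update res2 (pchB FB s d i h cs) := by
  match cs with
  | [] => rw [pchA, pchB]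
  | c :: rest =>
    rw [pchA, pchB, PySem.Set.update_append, PySem.Set.update_append]
    by_cases hcne : c ≠ s.getD i ""
    · rw [if_pos hcne, if_pos hcne]
      have hbr : PySem.Set.update res2 (prodA (s.set i c) (d - 1) (F' ++ [(i : Int)])) =
          PySem.Set.update res2 (prodB FB (s.set i c) (d - 1) (i + 1)) := by
        refine pvMain (s.set i c) (d - 1) (F' ++ [(i : Int)]) FB (i + 1) res2 ?_ ?_
        · intro m hm
          rw [pv_contains_append]
          have hmi : ¬ ((m : Int) = (i : Int)) := by
            intro hcon
            have : m = i := by exact_mod_cast hcon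
            omega
          rw [decide_eq_false hmi, Bool.or_false]
          exact CS m (by omega)
        · intro hd1 j c' w h1 h2 h3 h4 h5 h6
          have h2' : j < s.length := by simpa [List.length_set] using h2
          have hji : j ≠ i := by
            intro hcon
            exact h3 (by rw [pv_contains_append, hcon]; simp)
          have hjlt : j < i := by omega
          have hF'j : ¬ F'.contains (j : Int) = true := by
            intro hcon
            exact h3 (by rw [pv_contains_append, hcon]; simp)
          have hgd : (s.set i c).getD j "" = s.getD j "" := by
            simp only [List.getD_eq_getElem?_getD]
            rw [List.getElem?_set_ne (show i ≠ j by omega)]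
          rw [hgd] at h5
          rw [List.set_comm c c' (by omega)] at h6
          have hperm : prodA ((s.set j c').set i c) (d - 1 - 1) ((F' ++ [(i : Int)]) ++ [(j : Int)])
              = prodA ((s.set j c').set i c) (d - 1 - 1) ((F' ++ [(j : Int)]) ++ [(i : Int)]) := by
            refine prodA_perm _ _ _ _ (fun m => ?_)
            rw [pv_contains_append, pv_contains_append, pv_contains_append, pv_contains_append]
            cases hb : F'.contains m <;> simp [Bool.or_comm]
          rw [hperm] at h6
          have hmem : w ∈ prodA (s.set j c') (d - 1) (F' ++ [(j : Int)]) := by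
            refine pv_branch_mem (s.set j c') (d - 1) (F' ++ [(j : Int)]) i c w hd1
              (by simpa [List.length_set] using h) ?_ (hcs c List.mem_cons_self) ?_ h6
            · intro hcon
              rw [pv_contains_append] at hcon
              have hine : ¬ ((i : Int) = (j : Int)) := by
                intro hcon2
                have : i = j := by exact_mod_cast hcon2
                omega
              rw [decide_eq_false hine, Bool.or_false] at hcon
              exact hF hcon
            · simp only [List.getD_eq_getElem?_getD]
              rw [List.getElem?_set_ne (show j ≠ i by omega)]
              intro hcon
              exact hcne (by rw [List.getD_eq_getElem?_getD]; exact hcon)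
          exact Inv j c' w hjlt h2' hF'j h4 h5 hmem
      rw [hbr]
      refine pvCh s d F' FB start hd CS i hi h hF rest
        (fun c' hc' => hcs c' (List.mem_cons_of_mem _ hc')) _ ?_
      intro j c' w h1 h2 h3 h4 h5 h6
      exact (pv_mem_update res2 _ w).mpr (Or.inl (Inv j c' w h1 h2 h3 h4 h5 h6))
    · rw [if_neg hcne, if_neg hcne, PySem.Set.update_nil]
      exact pvCh s d F' FB start hd CS i hi h hF rest
        (fun c' hc' => hcs c' (List.mem_cons_of_mem _ hc')) res2 Inv
termination_by (pvFree s.length F', 0, s.length - i, cs.length)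
decreasing_by all_goals (
  first
    | exact Prod.Lex.right _ (Prod.Lex.left _ _ (by omega))
    | exact Prod.Lex.right _ (Prod.Lex.right _ (by omega))
    | exact Prod.Lex.right _ (Prod.Lex.right _ (by simp only [List.length_cons]; omega))
    | exact Prod.Lex.right _ (Prod.Lex.right _ (Prod.Lex.left _ _ (by omega)))
    | exact Prod.Lex.right _ (Prod.Lex.right _ (Prod.Lex.right _ (by omega)))
    | exact Prod.Lex.right _ (Prod.Lex.right _ (Prod.Lex.right _ (by simp only [List.length_cons]; omega)))
    | exact Prod.Lex.right _ (Prod.Lex.right _ (Prod.Lex.right _ (by simp only [pvChs, List.length_cons, List.length_nil]; omega)))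
    | exact Prod.Lex.left _ _ (by omega)
    | exact Prod.Lex.left _ _ (by simp only [List.length_set]; omega)
    | (refine Prod.Lex.left _ _ ?_
       try simp only [List.length_set]
       refine pvFree_lt _ _ _ (by omega) (by rw [Bool.eq_false_iff]; assumption)))
end

-- ---------- assembly ----------
theorem pv_final (s : List String) (d : Int) (fixed : Option (List Int)) (res : Option (List String)) :
    dClosure s d fixed res = dClosure_alt s d fixed res := by
  unfold dClosure dClosure_alt
  have hcontains : ∀ (F : List Int) (bnd : PySem.Set Int),
      (∀ j : Int, F.contains j = PySem.Set.contains bnd j) →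
      goA s d F (match res with
        | none => PySem.Set.empty
        | some l => if l.isEmpty then PySem.Set.empty else PySem.Set.ofList l) =
      runB bnd [(s, d, 0)] (match res with
        | none => PySem.Set.empty
        | some l => if l.isEmpty then PySem.Set.empty else PySem.Set.ofList l) := by
    intro F bnd hc
    rw [goA_eq, runB_single]
    exact pvMain s d F bnd 0 _ (fun i _ => hc (i : Int)) (fun _ j c w h1 => by omega)
  match fixed with
  | none => exact hcontains [] PySem.Set.empty (fun j => rfl)
  | some l =>
    by_cases hl : l.isEmpty
    · simp only [hl, if_pos rfl, if_true]
      exact hcontains [] PySem.Set.empty (fun j => rfl)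
    · simp only [if_neg hl]
      refine hcontains l (PySem.Set.ofList l) (fun j => ?_)
      simp [PySem.Set.contains, List.contains_eq_mem, PySem.Set.mem_ofList]

-- ===== VERDICT (by name: the statement is the Claim_ definition above) =====
theorem dClosure_spec : Claim_equal_dClosure := by
  intro s d fixed res _ _
  unfold Spec_dClosure
  exact pv_final s d fixed res
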